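-- pv_equiv track=rewrite | github.com/spdrnl/Ontology-Tradecraft | projects/project-5/scripts/preprocessing/enriching.py | classify_context_counts
-- ===== SOURCE A (Python) =====
-- def classify_context_counts(ref_type_by_label, ref_ctx_text: str):
--   """Count class/property/unknown labels present in the effective context."""
--   labels = [
--     line.split(":", 1)[0].lstrip("- ").strip()
--     for line in ref_ctx_text.splitlines()
--     if line.startswith("-") and ":" in line
--   ]
--   n_class = sum(1 for l in labels if ref_type_by_label.get(l) == "class")
--   n_prop = sum(1 for l in labels if ref_type_by_label.get(l) == "property")
--   n_unk = sum(1 for l in labels if ref_type_by_label.get(l) not in {"class", "property"})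
--   return n_class, n_prop, n_unk
-- ===== SOURCE B (Python) =====
-- def classify_context_counts(ref_type_by_label, ref_ctx_text: str):
--   """Count class/property/unknown labels present in the effective context."""
--   n_class = n_prop = n_unk = 0
--   for line in ref_ctx_text.splitlines():
--     if line.startswith("-") and ":" in line:
--       label = line.split(":", 1)[0].lstrip("- ").strip()
--       t = ref_type_by_label.get(label)
--       if t == "class":
--         n_class += 1
--       elif t == "property":
--         n_prop += 1
--       else:
--         n_unk += 1
--   return n_class, n_prop, n_unk
-- ===== Notes on version B (the rewrite author's own statement) =====
-- stated objective: simpler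
-- what changed: A builds an intermediate labels list and then makes three separate counting passes over it; B makes a single fused pass over the lines, parsing each label once and dispatching one of three counters.
import Mathlib
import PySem

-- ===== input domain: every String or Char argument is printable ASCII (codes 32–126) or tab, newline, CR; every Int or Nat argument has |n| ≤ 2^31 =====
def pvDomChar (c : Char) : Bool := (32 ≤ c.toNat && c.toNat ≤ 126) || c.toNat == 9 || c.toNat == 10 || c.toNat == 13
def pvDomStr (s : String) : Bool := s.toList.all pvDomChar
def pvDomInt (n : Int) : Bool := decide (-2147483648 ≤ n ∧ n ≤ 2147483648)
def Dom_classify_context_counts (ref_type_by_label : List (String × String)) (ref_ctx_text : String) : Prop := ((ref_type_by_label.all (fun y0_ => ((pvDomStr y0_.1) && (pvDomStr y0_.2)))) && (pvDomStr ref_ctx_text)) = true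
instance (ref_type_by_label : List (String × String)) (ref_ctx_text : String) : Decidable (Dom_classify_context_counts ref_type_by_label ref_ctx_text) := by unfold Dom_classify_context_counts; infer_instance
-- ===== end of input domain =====

-- B fuses A's intermediate labels list and three counting passes into one loop over the lines with three counters (objective: simpler).


-- ===== PORT A =====
-- shared helpers for the identical label-parsing expression of both Pythons
-- line.lstrip("- "): PySem has no lstrip-with-chars, hand-ported exactly (drop leading '-' and ' ')
def pvLstripDashSpace (cs : List Char) : List Char := cs.dropWhile (fun c => c == '-' || c == ' ')
-- line.split(":", 1)[0].lstrip("- ").strip()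
def pvLabelOf (line : String) : String :=
  PySem.Str.strip (String.ofList (pvLstripDashSpace
    (match PySem.Str.splitMax? line ":" 1 with
     | some (x :: _) => x
     | _ => "").toList))
-- line.startswith("-") and ":" in line
def pvIsEntry (line : String) : Bool := PySem.Str.startswith line "-" && PySem.Str.isIn ":" line

def classify_context_counts (ref_type_by_label : List (String × String)) (ref_ctx_text : String) : Int × Int × Int :=
  let labels := ((PySem.Str.splitlines ref_ctx_text).filter pvIsEntry).map pvLabelOf
  let d := PySem.Dict.ofList ref_type_by_label
  let n_class : Int := labels.foldl (fun acc l => if d.get? l == some "class" then acc + 1 else acc) 0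
  let n_prop : Int := labels.foldl (fun acc l => if d.get? l == some "property" then acc + 1 else acc) 0
  let n_unk : Int := labels.foldl (fun acc l => if !(d.get? l == some "class" || d.get? l == some "property") then acc + 1 else acc) 0
  (n_class, n_prop, n_unk)

-- ===== PORT B =====
def pvStepB (d : PySem.Dict String String) (acc : Int × Int × Int) (line : String) : Int × Int × Int :=
  if pvIsEntry line then
    let t := d.get? (pvLabelOf line)
    if t == some "class" then (acc.1 + 1, acc.2.1, acc.2.2)
    else if t == some "property" then (acc.1, acc.2.1 + 1, acc.2.2)
    else (acc.1, acc.2.1, acc.2.2 + 1)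
  else acc

def classify_context_counts_alt (ref_type_by_label : List (String × String)) (ref_ctx_text : String) : Int × Int × Int :=
  (PySem.Str.splitlines ref_ctx_text).foldl (pvStepB (PySem.Dict.ofList ref_type_by_label)) (0, 0, 0)

-- ===== PRECONDITION & SPEC =====
def Spec_classify_context_counts (ref_type_by_label : List (String × String)) (ref_ctx_text : String) (out : Int × Int × Int) : Prop := out = classify_context_counts_alt ref_type_by_label ref_ctx_text
instance (ref_type_by_label : List (String × String)) (ref_ctx_text : String) (out : Int × Int × Int) : Decidable (Spec_classify_context_counts ref_type_by_label ref_ctx_text out) := by unfold Spec_classify_context_counts; infer_instance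

-- ===== CLAIM (what is proved, stated in full; the proofs are below) =====
def Claim_equal_classify_context_counts : Prop := ∀ (ref_type_by_label : List (String × String)) (ref_ctx_text : String), Dom_classify_context_counts ref_type_by_label ref_ctx_text → Spec_classify_context_counts ref_type_by_label ref_ctx_text (classify_context_counts ref_type_by_label ref_ctx_text)

-- ===== LEMMAS AND PROOFS =====
lemma foldl_count (p : String → Bool) (ls : List String) (n : Int) :
    ls.foldl (fun acc l => if p l then acc + 1 else acc) n = n + (ls.countP p : Int) := by
  induction ls generalizing n with
  | nil => simp
  | cons x xs ih =>
    simp only [List.foldl_cons, List.countP_cons, ih]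
    by_cases h : p x = true <;> simp [h] <;> omega

lemma stepB_fold (d : PySem.Dict String String) (lines : List String) (a b c : Int) :
    lines.foldl (pvStepB d) (a, b, c) =
      (a + (((lines.filter pvIsEntry).map pvLabelOf).countP (fun l => d.get? l == some "class") : Int),
       b + (((lines.filter pvIsEntry).map pvLabelOf).countP (fun l => d.get? l == some "property") : Int),
       c + (((lines.filter pvIsEntry).map pvLabelOf).countP (fun l => !(d.get? l == some "class" || d.get? l == some "property")) : Int)) := by
  induction lines generalizing a b c with
  | nil => simp
  | cons x xs ih =>
    simp only [List.foldl_cons, List.filter_cons]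
    by_cases hx : pvIsEntry x = true
    · simp only [hx, if_true, pvStepB, List.map_cons, List.countP_cons]
      by_cases h1 : d.get? (pvLabelOf x) == some "class"
      · have h2 : (d.get? (pvLabelOf x) == some "property") = false := by
          cases h3 : d.get? (pvLabelOf x) <;> simp_all
        simp [h1, h2, ih]; omega
      · by_cases h2 : d.get? (pvLabelOf x) == some "property"
        · simp [h1, h2, ih]; omega
        · simp [h1, h2, ih]; omega
    · simp only [Bool.not_eq_true] at hx
      simp [hx, pvStepB, ih]

-- ===== VERDICT (by name: the statement is the Claim_ definition above) =====
theorem classify_context_counts_spec : Claim_equal_classify_context_counts := by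
  intro rt t _
  unfold Spec_classify_context_counts classify_context_counts classify_context_counts_alt
  rw [stepB_fold]
  simp only [foldl_count, List.countP_map]
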